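-- pv_equiv track=rewrite | github.com/AndreeaIlie516/University | Year 1/Semester 1/Fundamentals of Programming/Laboratory/Assignment4/src/functions.py | filter_real
-- ===== SOURCE A (Python) =====
-- def get_imaginary_part(complex_number):
--     """
--     Get imaginary part of a complex number
--     :param complex_number: The complex number (list)
--     :return: The imaginary part of the complex number
--     """
--     return complex_number[1]
--
-- def is_real(complex_number):
--     """
--     Check if a number is real or not
--     :param complex_number: The complex number to be checked
--     :return: 1 - if the number is real
--              0 - otherwise
--     """
--     if get_imaginary_part(complex_number) == 0:
--         return 1
--     return 0
--
-- def filter_real(history, list_of_complex_numbers):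
--     """
--     Filter the real numbers in the list
--     :param history: The history list of the changes in the list of complex numbers
--     :param list_of_complex_numbers: The list of complex numbers
--     :return: list_of_complex_numbers: The list of complex numbers filtered
--     """
--     index = 0
--     add_list_to_history(history, list_of_complex_numbers)
--     while index < len(list_of_complex_numbers):
--         if is_real(list_of_complex_numbers[index]) == 0:
--             del list_of_complex_numbers[index]
--         else:
--             index += 1
--     return list_of_complex_numbers
--
-- def add_list_to_history(history, list):
--     """
--     Add a new element to the history list of changes
--     :param history: The history list of changes
--     :param list: The new element to be added
--     :return:
--     """
--     history_list = list[:]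
--     history.append(history_list)
-- ===== SOURCE B (Python) =====
-- def add_list_to_history(history, list):
--     history_list = list[:]
--     history.append(history_list)
--
-- def filter_real(history, list_of_complex_numbers):
--     """Two-pointer in-place compaction: copy each real number forward to the
--     write position, then truncate the leftover tail."""
--     add_list_to_history(history, list_of_complex_numbers)
--     write = 0
--     for read in range(len(list_of_complex_numbers)):
--         if list_of_complex_numbers[read][1] == 0:
--             list_of_complex_numbers[write] = list_of_complex_numbers[read]
--             write += 1
--     del list_of_complex_numbers[write:]
--     return list_of_complex_numbers
-- ===== Notes on version B (the rewrite author's own statement) =====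
-- stated objective: alternative
-- what changed: A repeatedly deletes non-real elements in place with del at a moving index inside a while loop; B instead makes a single two-pointer compaction pass (copy each real element forward to a write position, then truncate the tail once).
import Mathlib
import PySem

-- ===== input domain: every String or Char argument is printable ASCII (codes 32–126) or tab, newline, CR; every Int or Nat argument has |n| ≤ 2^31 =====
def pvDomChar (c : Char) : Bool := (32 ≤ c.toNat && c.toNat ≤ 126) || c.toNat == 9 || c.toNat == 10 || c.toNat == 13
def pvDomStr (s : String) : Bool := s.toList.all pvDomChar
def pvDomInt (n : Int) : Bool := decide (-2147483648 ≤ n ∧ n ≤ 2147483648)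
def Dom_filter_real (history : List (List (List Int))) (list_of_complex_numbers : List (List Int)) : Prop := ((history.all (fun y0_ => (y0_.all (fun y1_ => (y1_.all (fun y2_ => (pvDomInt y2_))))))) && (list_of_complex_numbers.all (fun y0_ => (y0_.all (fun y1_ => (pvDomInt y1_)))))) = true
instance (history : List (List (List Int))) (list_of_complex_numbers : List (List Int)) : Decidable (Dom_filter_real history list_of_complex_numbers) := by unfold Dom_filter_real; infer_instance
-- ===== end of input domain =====

-- B replaces A's repeated in-place `del` at a moving index by a single two-pointer
-- compaction pass; the equivalence proved is about the RETURN value (both Pythons also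
-- mutate list_of_complex_numbers to that same value and append the same history snapshot).

-- ===== PORT A =====
-- get_imaginary_part: complex_number[1]; in range on Pre_ (inner lists have length ≥ 2)
def pvImagA (complex_number : List Int) : Int := PySem.List.pyGetD complex_number 1 0
-- is_real
def pvIsRealA (complex_number : List Int) : Int := if pvImagA complex_number = 0 then 1 else 0
-- the while loop: each step either `del` shortens the list or the index advances
def pvALoop (xs : List (List Int)) (index : Nat) : List (List Int) :=
  if h : index < xs.length then
    if pvIsRealA (xs.getD index []) = 0 then
      pvALoop (xs.eraseIdx index) index
    else
      pvALoop xs (index + 1)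
  else xs
termination_by xs.length - index
decreasing_by
  · have := List.length_eraseIdx_of_lt (l := xs) (i := index) h; omega
  · omega

def filter_real (history : List (List (List Int))) (list_of_complex_numbers : List (List Int)) : List (List Int) :=
  -- add_list_to_history mutates history only; the returned value is the loop result
  pvALoop list_of_complex_numbers 0

-- ===== PORT B =====
-- one step of the two-pointer scan: state = (current list, write)
def pvBStep (st : List (List Int) × Nat) (read : Int) : List (List Int) × Nat :=
  if PySem.List.pyGetD (PySem.List.pyGetD st.1 read []) 1 0 = 0 then
    (PySem.List.pySetD st.1 (st.2 : Int) (PySem.List.pyGetD st.1 read []), st.2 + 1)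
  else st

def filter_real_alt (history : List (List (List Int))) (list_of_complex_numbers : List (List Int)) : List (List Int) :=
  let st := (PySem.List.pyRange 0 (list_of_complex_numbers.length : Int) 1).foldl pvBStep
              (list_of_complex_numbers, 0)
  -- del ys[write:]  →  keep ys[:write]
  PySem.List.slice st.1 none (some (st.2 : Int))

-- ===== PRECONDITION & SPEC =====
-- Pre_ excludes exactly the inputs where Python A raises IndexError: some element of
-- the list has fewer than 2 components (complex_number[1] in get_imaginary_part).
def Pre_filter_real (history : List (List (List Int))) (list_of_complex_numbers : List (List Int)) : Prop :=
  ∀ c ∈ list_of_complex_numbers, 2 ≤ c.length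
instance (history : List (List (List Int))) (list_of_complex_numbers : List (List Int)) : Decidable (Pre_filter_real history list_of_complex_numbers) := by unfold Pre_filter_real; infer_instance

def pvWitness_filter_real : List (List (List Int)) × List (List Int) := ([], [[1, 0], [2, 3], [0, 0]])

def Spec_filter_real (history : List (List (List Int))) (list_of_complex_numbers : List (List Int)) (out : List (List Int)) : Prop := out = filter_real_alt history list_of_complex_numbers
instance (history : List (List (List Int))) (list_of_complex_numbers : List (List Int)) (out : List (List Int)) : Decidable (Spec_filter_real history list_of_complex_numbers out) := by unfold Spec_filter_real; infer_instance

-- ===== CLAIM (what is proved, stated in full; the proofs are below) =====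
def Claim_equal_filter_real : Prop := ∀ (history : List (List (List Int))) (list_of_complex_numbers : List (List Int)), Dom_filter_real history list_of_complex_numbers → Pre_filter_real history list_of_complex_numbers → Spec_filter_real history list_of_complex_numbers (filter_real history list_of_complex_numbers)

-- ===== LEMMAS AND PROOFS =====

-- the 'is real' test as a Bool predicate on an element (shared characterisation of both loops)
def pvReal (c : List Int) : Bool := PySem.List.pyGetD c 1 0 == 0

-- A's while loop keeps the first `index` elements and filters the rest
theorem pvALoop_eq (xs : List (List Int)) (index : Nat) :
    pvALoop xs index = xs.take index ++ (xs.drop index).filter pvReal := by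
  induction xs, index using pvALoop.induct with
  | case1 xs i h hr ih =>
    rw [pvALoop, dif_pos h, if_pos hr, ih]
    rw [List.getD_eq_getElem xs [] h] at hr
    simp only [pvIsRealA, pvImagA] at hr
    have hnz : ¬ (PySem.List.pyGetD xs[i] 1 0 = 0) := by intro hc; simp [hc] at hr
    have hnot : pvReal xs[i] = false := by simp [pvReal, hnz]
    have hlen : (xs.take i).length = i := by simp; omega
    rw [List.eraseIdx_eq_take_drop_succ, List.take_left' hlen, List.drop_left' hlen,
        List.drop_eq_getElem_cons h, List.filter_cons_of_neg (by simp [hnot])]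
  | case2 xs i h hr ih =>
    rw [pvALoop, dif_pos h, if_neg hr, ih]
    rw [List.getD_eq_getElem xs [] h] at hr
    simp only [pvIsRealA, pvImagA] at hr
    have hz : PySem.List.pyGetD xs[i] 1 0 = 0 := by by_contra hc; simp [hc] at hr
    rw [List.drop_eq_getElem_cons h, List.filter_cons_of_pos (by simp [pvReal, hz]),
        ← List.take_concat_get (h := h)]
    rw [List.concat_eq_append, List.append_assoc, List.singleton_append]
  | case3 xs i h =>
    rw [pvALoop, dif_neg h, List.drop_eq_nil_of_le (by omega), List.take_of_length_le (by omega)]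
    simp

-- invariant of B's two-pointer fold: length preserved, write ≤ read, the tail beyond
-- `n` is untouched, and the prefix up to `write` is the filtered prefix of the input
theorem pvB_inv (xs : List (List Int)) (n : Nat) (hn : n ≤ xs.length) :
    let st := (List.range n).foldl (fun s (k : Nat) => pvBStep s (k : Int)) (xs, 0)
    st.1.length = xs.length ∧ st.2 ≤ n ∧ st.1.drop n = xs.drop n ∧
      st.1.take st.2 = (xs.take n).filter pvReal := by
  induction n with
  | zero => simp
  | succ n ih =>
    have hn' : n ≤ xs.length := by omega
    obtain ⟨hlen, hw, hdrop, htake⟩ := ih hn'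
    set st := (List.range n).foldl (fun s (k : Nat) => pvBStep s (k : Int)) (xs, 0) with hst
    have hnlt : n < st.1.length := by omega
    have hxn : n < xs.length := by omega
    have hget : st.1[n]'hnlt = xs[n]'hxn := by
      have h0 : (st.1.drop n)[0]'(by simp; omega) = (xs.drop n)[0]'(by simp; omega) := by
        simp only [hdrop]
      simpa using h0
    have hc : PySem.List.pyGetD st.1 (n : Int) [] = xs[n]'hxn := by
      rw [PySem.List.pyGetD_natCast, List.getD_eq_getElem st.1 [] hnlt, hget]
    have hstep : (List.range (n+1)).foldl (fun s (k : Nat) => pvBStep s (k : Int)) (xs, 0)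
        = pvBStep st (n : Int) := by
      rw [List.range_succ, List.foldl_append, ← hst]; simp
    rw [hstep]
    unfold pvBStep
    rw [hc]
    have hdrop1 : st.1.drop (n+1) = xs.drop (n+1) := by
      have := congrArg (List.drop 1) hdrop
      simpa [List.drop_drop, Nat.add_comm] using this
    by_cases hz : PySem.List.pyGetD (xs[n]'hxn) 1 0 = 0
    · rw [if_pos hz]
      have hwlt : st.2 < st.1.length := by omega
      have hset : PySem.List.pySetD st.1 (st.2 : Int) (xs[n]'hxn) = st.1.set st.2 (xs[n]'hxn) := by
        simp [PySem.List.pySetD_natCast]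
      have hts : (st.1.take st.2).length = st.2 := by simp; omega
      refine ⟨by simp [hset, hlen], by omega, ?_, ?_⟩
      · rw [hset, List.drop_set_of_lt (by omega), hdrop1]
      · rw [hset, List.set_eq_take_append_cons_drop, if_pos hwlt,
            List.take_append, List.take_take, Nat.min_eq_right (by omega), hts,
            Nat.add_sub_cancel_left, List.take_one, htake,
            ← List.take_concat_get (h := hxn), List.concat_eq_append, List.filter_append]
        simp [pvReal, hz]
    · rw [if_neg hz]
      refine ⟨hlen, by omega, hdrop1, ?_⟩
      rw [htake, ← List.take_concat_get (h := hxn), List.concat_eq_append, List.filter_append]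
      simp [pvReal, hz]

-- B computes the filter of the input
theorem pvB_eq (history : List (List (List Int))) (xs : List (List Int)) :
    filter_real_alt history xs = xs.filter pvReal := by
  unfold filter_real_alt
  rw [PySem.List.pyRange_zero_natCast, List.foldl_map]
  obtain ⟨hlen, hw, hdrop, htake⟩ := pvB_inv xs xs.length le_rfl
  rw [PySem.List.slice_to_natCast, htake, List.take_length]

-- ===== VERDICT (by name: the statement is the Claim_ definition above) =====
theorem filter_real_spec : Claim_equal_filter_real := by
  intro history xs _ _
  unfold Spec_filter_real filter_real
  rw [pvALoop_eq, pvB_eq]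
  simp
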